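-- pv_equiv track=rewrite | github.com/NDania/Homework_2011 | Homework2711/task_03.py | dev_new
-- ===== SOURCE A (Python) =====
-- def dev_new(n):
--     list_1 = []
--     while n>=2:
--         list_1.append(n%2)
--         n = n//2
--     else:
--         list_1.append(n)
--
--     temp = []
--     d = len(list_1)
--     for i in range(0,d):
--         temp.append(list_1[d-1-i])
--     return temp
-- ===== SOURCE B (Python) =====
-- def dev_new(n):
--     if n < 2:
--         return [n]
--     k = n.bit_length()
--     return [(n >> (k - 1 - i)) & 1 for i in range(k)]
-- ===== Notes on version B (the rewrite author's own statement) =====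
-- stated objective: simpler
-- what changed: Replaces A's build-LSB-list-then-index-reverse two-pass loop with a single comprehension that reads bits MSB-first by position using bit_length and shifts.
import Mathlib
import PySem

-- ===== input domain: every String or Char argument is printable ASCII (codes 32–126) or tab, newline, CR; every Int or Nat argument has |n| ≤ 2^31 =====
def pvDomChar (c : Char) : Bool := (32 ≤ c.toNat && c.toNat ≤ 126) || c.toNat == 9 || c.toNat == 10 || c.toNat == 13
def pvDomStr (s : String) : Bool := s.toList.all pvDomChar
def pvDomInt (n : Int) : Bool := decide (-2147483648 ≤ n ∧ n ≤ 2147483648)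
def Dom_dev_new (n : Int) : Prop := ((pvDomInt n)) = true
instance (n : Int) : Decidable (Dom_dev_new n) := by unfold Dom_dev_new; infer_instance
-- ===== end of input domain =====

-- B replaces A's build-LSB-list-then-index-reverse two passes with one comprehension reading bits MSB-first via bit_length.

-- ===== PORT A =====
-- the while loop: append n%2, halve, until n < 2, then append n
def devLoopA (n : Int) (acc : List Int) : List Int :=
  if 2 ≤ n then devLoopA (PySem.Int.floordiv n 2) (acc ++ [PySem.Int.mod n 2]) else acc ++ [n]
  termination_by n.toNat
  decreasing_by
    rw [PySem.Int.floordiv_eq_ediv_of_pos (by omega)]; omega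

def dev_new (n : Int) : List Int :=
  let list1 := devLoopA n []
  let d : Int := (list1.length : Int)
  -- list_1[d-1-i] is always in range, so pyGetD is exact here
  (PySem.List.pyRange 0 d 1).foldl (fun temp i => temp ++ [PySem.List.pyGetD list1 (d - 1 - i) 0]) []

-- ===== PORT B =====
def dev_new_alt (n : Int) : List Int :=
  if n < 2 then [n]
  else
    let k : Int := (PySem.Int.bitLength n : Int)
    -- (n >> (k-1-i)) & 1: the shift amount k-1-i is nonnegative for i in range(k), so .toNat is exact
    (PySem.List.pyRange 0 k 1).map (fun i => PySem.Int.band (n >>> (k - 1 - i).toNat) 1)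

-- ===== PRECONDITION & SPEC =====
def Spec_dev_new (n : Int) (out : List Int) : Prop := out = dev_new_alt n
instance (n : Int) (out : List Int) : Decidable (Spec_dev_new n out) := by unfold Spec_dev_new; infer_instance

-- ===== CLAIM (what is proved, stated in full; the proofs are below) =====
def Claim_equal_dev_new : Prop := ∀ (n : Int), Dom_dev_new n → Spec_dev_new n (dev_new n)

-- ===== LEMMAS AND PROOFS =====

-- A's while loop without the accumulator: the LSB-first digit list
def lsbA (n : Int) : List Int :=
  if 2 ≤ n then PySem.Int.mod n 2 :: lsbA (PySem.Int.floordiv n 2) else [n]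
  termination_by n.toNat
  decreasing_by
    rw [PySem.Int.floordiv_eq_ediv_of_pos (by omega)]; omega

theorem devLoopA_eq (n : Int) (acc : List Int) : devLoopA n acc = acc ++ lsbA n := by
  induction n, acc using devLoopA.induct with
  | case1 n acc h ih =>
    rw [devLoopA, lsbA, if_pos h, if_pos h, ih]
    simp
  | case2 n acc h =>
    rw [devLoopA, lsbA, if_neg h, if_neg h]

-- A's second loop reverses the list
theorem reverse_loop (l : List Int) :
    (PySem.List.pyRange 0 (l.length : Int) 1).foldl
      (fun temp i => temp ++ [PySem.List.pyGetD l ((l.length : Int) - 1 - i) 0]) []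
    = l.reverse := by
  rw [PySem.List.foldl_append_singleton_eq_map, List.nil_append]
  apply List.ext_getElem
  · simp [PySem.List.length_pyRange_one]
  · intro i h1 h2
    have hi : i < l.length := by
      simpa [PySem.List.length_pyRange_one] using h1
    simp only [List.getElem_map, PySem.List.getElem_pyRange_one, List.getElem_reverse, zero_add]
    rw [show ((l.length : Int) - 1 - (i : Int)) = ((l.length - 1 - i : Nat) : Int) from by omega,
      PySem.List.pyGetD_natCast]
    exact List.getD_eq_getElem l 0 (by omega)

-- the LSB-first list of a positive n is its bits indexed 0..bitLength-1
theorem lsbA_eq_bits (n : Int) (h : 1 ≤ n) :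
    lsbA n = (List.range (PySem.Int.bitLength n)).map (fun j : Nat => PySem.Int.band (n >>> j) 1) := by
  induction n using lsbA.induct with
  | case1 n h2 ih =>
    have hd2 : (1:Int) ≤ PySem.Int.floordiv n 2 := by
      rw [PySem.Int.floordiv_eq_ediv_of_pos (by omega)]; omega
    rw [lsbA, if_pos h2, PySem.Int.bitLength_of_pos (by omega), List.range_succ_eq_map,
      List.map_cons, List.map_map, ih hd2]
    congr 1
    · simp [PySem.Int.band_one]
    · apply List.map_congr_left
      intro j hj
      show PySem.Int.band (PySem.Int.floordiv n 2 >>> j) 1 = PySem.Int.band (n >>> (Nat.succ j)) 1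
      congr 1
      rw [Nat.succ_eq_add_one, show j + 1 = 1 + j from by omega, Int.shiftRight_add]
      congr 1
      rw [Int.shiftRight_eq_div_pow, PySem.Int.floordiv_eq_ediv_of_pos (by omega)]
      norm_num
  | case2 n h2 =>
    have : n = 1 := by omega
    subst this
    rw [lsbA, if_neg h2]
    decide
theorem dev_new_eq_alt (n : Int) : dev_new n = dev_new_alt n := by
  have h1 : dev_new n = (devLoopA n []).reverse := by
    rw [dev_new]; exact reverse_loop (devLoopA n [])
  rw [h1, devLoopA_eq, List.nil_append]
  by_cases h : n < 2
  · rw [lsbA, if_neg (by omega)]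
    simp only [dev_new_alt, if_pos h]
    simp
  · rw [lsbA_eq_bits n (by omega)]
    simp only [dev_new_alt, if_neg h]
    apply List.ext_getElem
    · simp [PySem.List.length_pyRange_one]
    · intro i h1 h2
      have hk : i < PySem.Int.bitLength n := by
        simpa [PySem.List.length_pyRange_one] using h2
      simp only [List.getElem_reverse, List.getElem_map, List.length_map, List.length_range,
        List.getElem_range, PySem.List.getElem_pyRange_one, zero_add]
      rw [show (((PySem.Int.bitLength n : Int)) - 1 - (i : Int)).toNat
            = PySem.Int.bitLength n - 1 - i from by omega]

-- ===== VERDICT (by name: the statement is the Claim_ definition above) =====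
theorem dev_new_spec : Claim_equal_dev_new := by
  intro n _
  unfold Spec_dev_new
  exact dev_new_eq_alt n
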